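-- pv_equiv track=rewrite | github.com/HEP-KBFI/tth-htt | scripts/find_samples.py | split_into_ranges
-- ===== SOURCE A (Python) =====
-- import itertools
--
-- def split_into_ranges(flat_list):
--   # The input is a list of numbers, e.g. [4, 5, 6, 10, 11, 13, 14, 15]
--   # which is split into lists that represent sub-ranges, which in our example should be
--   # [[4, 6], [10, 11], [13, 14, 15]]
--   # Notice that we assume that the endpoints of both ranges are included (which I hope is the case
--   # in the gloden JSON files)
--
--   # First, let's find at which points in the list the sequentiality is broken
--   # In our example, the program below should return [2, 4], b/c the 3rd and 4th (5th and 6th)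
--   # element in the list differ by more than one
--   split_indices = [ i for i in range(len(flat_list) - 1) if flat_list[i + 1] != flat_list[i] + 1 ]
--
--   # No let's construct the sub-range format by going through the break points one-by-one:
--   # prev_idx = 0, curr_idx = 2,
--   # prev_idx = 3, curr_idx = 4
--   prev_idx = 0
--   split_ranges = []
--   for curr_idx in split_indices:
--     split_ranges.append([flat_list[prev_idx],flat_list[curr_idx]])
--     prev_idx = curr_idx + 1
--   # Here we have to consider the final ,,tail'', which spans the index range 5..7 (included)
--   # Notice that if the input list is fully sequential, the split_ranges variable remains empty,
--   # and prev_idx remains 0, which means that the full range is concentrated into a single range here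
--   split_ranges.append([flat_list[prev_idx],flat_list[len(flat_list) - 1]])
--
--   # Make sure that we can recover the full flat input list from split_ranges
--   # (cf. get_golden_runlumi for more)
--   flat_list_to_test = list(itertools.chain(
--     *[list(range(split_range[0], split_range[1] + 1)) for split_range in split_ranges]
--   ))
--   if flat_list_to_test != flat_list:
--     assert(0)
--
--   return split_ranges
-- ===== SOURCE B (Python) =====
-- def split_into_ranges(flat_list):
--   # Single pass: build the [start, end] sub-ranges directly while walking the
--   # list, instead of first collecting break indices and then re-indexing.
--   start = prev = flat_list[0]
--   split_ranges = []
--   for x in flat_list[1:]: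
--     if x != prev + 1:
--       split_ranges.append([start, prev])
--       start = x
--     prev = x
--   split_ranges.append([start, prev])
--   return split_ranges
-- ===== Notes on version B (the rewrite author's own statement) =====
-- stated objective: simpler
-- what changed: B builds the [start,end] sub-ranges in one direct pass tracking start/prev, instead of A's three phases (collect break indices by re-indexing the list, fold over the indices, then reconstruct the whole list with itertools.chain to assert the result); the reconstruction check is dropped because it provably never fires.
import Mathlib
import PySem

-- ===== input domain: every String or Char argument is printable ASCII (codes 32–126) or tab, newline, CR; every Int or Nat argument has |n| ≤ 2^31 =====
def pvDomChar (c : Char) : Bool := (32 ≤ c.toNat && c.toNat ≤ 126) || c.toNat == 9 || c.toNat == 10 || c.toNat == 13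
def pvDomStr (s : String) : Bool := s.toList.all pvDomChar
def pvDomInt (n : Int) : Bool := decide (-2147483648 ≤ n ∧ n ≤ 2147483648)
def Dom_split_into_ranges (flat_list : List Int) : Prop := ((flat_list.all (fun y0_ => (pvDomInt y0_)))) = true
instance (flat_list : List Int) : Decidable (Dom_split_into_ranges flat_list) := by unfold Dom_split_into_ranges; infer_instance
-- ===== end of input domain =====

-- B replaces A's three phases (break-index collection, fold over indices, chain-reconstruction assert)
-- by one direct pass building the ranges; objective: simpler.

-- ===== PORT A =====
-- flat_list[i] (always with an in-range index here; default never read)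
def pvAt (l : List Int) (i : Int) : Int := (PySem.List.pyGet? l i).getD 0

-- the list comprehension [ i for i in range(len(flat_list) - 1) if flat_list[i+1] != flat_list[i] + 1 ]
def pvSplitIndices (fl : List Int) : List Int :=
  (PySem.List.pyRange 0 ((fl.length : Int) - 1) 1).filter
    (fun i => decide (pvAt fl (i + 1) ≠ pvAt fl i + 1))

def split_into_ranges (flat_list : List Int) : List (List Int) :=
  let split_indices := pvSplitIndices flat_list
  -- for curr_idx in split_indices: append [flat_list[prev_idx], flat_list[curr_idx]]; prev_idx = curr_idx + 1
  let st := split_indices.foldl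
      (fun (s : Int × List (List Int)) curr_idx =>
        (curr_idx + 1, s.2 ++ [[pvAt flat_list s.1, pvAt flat_list curr_idx]]))
      (0, [])
  let split_ranges := st.2 ++ [[pvAt flat_list st.1, pvAt flat_list ((flat_list.length : Int) - 1)]]
  -- itertools.chain reconstruction
  let flat_list_to_test := split_ranges.flatMap
      (fun split_range => PySem.List.pyRange (pvAt split_range 0) (pvAt split_range 1 + 1) 1)
  if flat_list_to_test ≠ flat_list then []   -- Python: assert(0) raises AssertionError (outside Pre_; in fact unreachable)
  else split_ranges

-- ===== PORT B =====
-- the body of B's for-loop: state (start, prev, split_ranges)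
def pvStepB (t : Int × Int × List (List Int)) (v : Int) : Int × Int × List (List Int) :=
  if v ≠ t.2.1 + 1 then (v, v, t.2.2 ++ [[t.1, t.2.1]]) else (t.1, v, t.2.2)

def split_into_ranges_alt (flat_list : List Int) : List (List Int) :=
  match flat_list with
  | [] => []   -- Python B: flat_list[0] raises IndexError here (outside Pre_)
  | x :: rest =>
    -- start = prev = flat_list[0]; for v in flat_list[1:]: …
    let r := rest.foldl pvStepB (x, x, [])
    r.2.2 ++ [[r.1, r.2.1]]

-- ===== PRECONDITION & SPEC =====
-- Pre_ excludes only the empty list, on which both Pythons raise IndexError.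
def Pre_split_into_ranges (flat_list : List Int) : Prop := flat_list ≠ []
instance (flat_list : List Int) : Decidable (Pre_split_into_ranges flat_list) := by
  unfold Pre_split_into_ranges; infer_instance
def pvWitness_split_into_ranges : List Int := ([4, 5, 6, 10, 11, 13, 14, 15])
def Spec_split_into_ranges (flat_list : List Int) (out : List (List Int)) : Prop := out = split_into_ranges_alt flat_list
instance (flat_list : List Int) (out : List (List Int)) : Decidable (Spec_split_into_ranges flat_list out) := by unfold Spec_split_into_ranges; infer_instance

-- ===== CLAIM (what is proved, stated in full; the proofs are below) =====
def Claim_equal_split_into_ranges : Prop := ∀ (flat_list : List Int), Dom_split_into_ranges flat_list → Pre_split_into_ranges flat_list → Spec_split_into_ranges flat_list (split_into_ranges flat_list)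

-- ===== LEMMAS AND PROOFS =====

-- B's recursion, written structurally: ranges of the tail given current start and prev.
def pvRanges (s prev : Int) : List Int → List (List Int)
  | [] => [[s, prev]]
  | x :: xs => if x ≠ prev + 1 then [s, prev] :: pvRanges x x xs else pvRanges s x xs

-- A's fold over the break indices, written structurally.
def pvGo (fl : List Int) : Int → List Int → List (List Int)
  | p, [] => [[pvAt fl p, pvAt fl ((fl.length : Int) - 1)]]
  | p, c :: cs => [pvAt fl p, pvAt fl c] :: pvGo fl (c + 1) cs

-- replace the start of the first range
def pvModHead (s : Int) : List (List Int) → List (List Int)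
  | (_ :: b) :: rs => (s :: b) :: rs
  | l => l

theorem pvAt_zero_cons (x : Int) (l : List Int) : pvAt (x :: l) 0 = x := by
  simp [pvAt]

theorem pvAt_cons_succ (x : Int) (l : List Int) (i : Int) (h : 0 ≤ i) :
    pvAt (x :: l) (i + 1) = pvAt l i := by
  lift i to Nat using h
  simp [pvAt, PySem.List.pyGet?_cons_succ]

theorem pv_foldA (fl : List Int) (cs : List Int) (p : Int) (acc : List (List Int)) :
    (let st := cs.foldl
        (fun (s : Int × List (List Int)) curr_idx =>
          (curr_idx + 1, s.2 ++ [[pvAt fl s.1, pvAt fl curr_idx]])) (p, acc);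
     st.2 ++ [[pvAt fl st.1, pvAt fl ((fl.length : Int) - 1)]]) = acc ++ pvGo fl p cs := by
  induction cs generalizing p acc with
  | nil => simp [pvGo]
  | cons c cs ih => simp only [List.foldl_cons, pvGo]; rw [ih]; simp

theorem pv_foldB (xs : List Int) (s prev : Int) (acc : List (List Int)) :
    (let r := xs.foldl pvStepB (s, prev, acc);
     r.2.2 ++ [[r.1, r.2.1]]) = acc ++ pvRanges s prev xs := by
  induction xs generalizing s prev acc with
  | nil => simp [pvRanges]
  | cons x xs ih =>
    simp only [List.foldl_cons]
    by_cases h : x = prev + 1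
    · have hs : pvStepB (s, prev, acc) x = (s, x, acc) := by simp [pvStepB, h]
      rw [hs, ih, pvRanges]; simp [h]
    · have hs : pvStepB (s, prev, acc) x = (x, x, acc ++ [[s, prev]]) := by simp [pvStepB, h]
      rw [hs, ih, pvRanges]; simp [h]

theorem pv_range_shift (a b : Int) :
    PySem.List.pyRange (a + 1) (b + 1) 1 = (PySem.List.pyRange a b 1).map (· + 1) := by
  rw [PySem.List.pyRange_one, PySem.List.pyRange_one]
  have : b + 1 - (a + 1) = b - a := by ring
  rw [this, List.map_map]
  exact List.map_congr_left (fun k _ => by simp; ring)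

theorem pv_sIdx_nonneg (fl : List Int) : ∀ i ∈ pvSplitIndices fl, 0 ≤ i := by
  intro i hi
  have := List.mem_of_mem_filter hi
  exact (PySem.List.mem_pyRange_one.mp this).1

theorem pv_sIdx_singleton (x : Int) : pvSplitIndices [x] = [] := by
  simp [pvSplitIndices, PySem.List.pyRange_one_eq_nil]

theorem pv_sIdx_cons (x y : Int) (t : List Int) :
    pvSplitIndices (x :: y :: t) =
      (if y ≠ x + 1 then [0] else []) ++ (pvSplitIndices (y :: t)).map (· + 1) := by
  have hm : ((x :: y :: t).length : Int) - 1 = ((y :: t).length : Int) := by simp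
  have hpos : (0 : Int) < ((y :: t).length : Int) := by exact_mod_cast Nat.succ_pos t.length
  unfold pvSplitIndices
  rw [hm, PySem.List.pyRange_one_cons hpos]
  rw [List.filter_cons]
  have h0 : pvAt (x :: y :: t) (0 + 1) = y := by
    rw [pvAt_cons_succ _ _ _ le_rfl, pvAt_zero_cons]
  have h1 := pv_range_shift 0 (((y :: t).length : Int) - 1)
  rw [sub_add_cancel] at h1
  rw [h1, List.filter_map]
  have h2 : ∀ i ∈ PySem.List.pyRange 0 (((y :: t).length : Int) - 1) 1,
      ((fun i => decide (pvAt (x :: y :: t) (i + 1) ≠ pvAt (x :: y :: t) i + 1)) ∘ (· + 1)) i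
        = (fun i => decide (pvAt (y :: t) (i + 1) ≠ pvAt (y :: t) i + 1)) i := by
    intro i hi
    have hnn : 0 ≤ i := (PySem.List.mem_pyRange_one.mp hi).1
    simp only [Function.comp_apply]
    rw [pvAt_cons_succ x (y :: t) (i + 1) (by omega), pvAt_cons_succ x (y :: t) i hnn]
  rw [List.filter_congr h2]
  have h3 : pvAt (x :: y :: t) 0 = x := pvAt_zero_cons _ _
  rw [h0, h3]
  by_cases h : y = x + 1
  · simp [h]
  · simp [h]

theorem pv_go_shift (x : Int) (rest : List Int) (h : rest ≠ []) :
    ∀ (cs : List Int) (p : Int), 0 ≤ p → (∀ c ∈ cs, 0 ≤ c) →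
      pvGo (x :: rest) (p + 1) (cs.map (· + 1)) = pvGo rest p cs := by
  have hl : (1 : Int) ≤ (rest.length : Int) := by
    have := List.length_pos_of_ne_nil h; exact_mod_cast this
  have hlast : pvAt (x :: rest) (((x :: rest).length : Int) - 1)
      = pvAt rest ((rest.length : Int) - 1) := by
    have e : ((x :: rest).length : Int) - 1 = ((rest.length : Int) - 1) + 1 := by
      push_cast [List.length_cons]; ring
    rw [e, pvAt_cons_succ _ _ _ (by omega)]
  intro cs
  induction cs with
  | nil =>
    intro p hp _
    simp only [List.map_nil, pvGo]
    rw [pvAt_cons_succ _ _ _ hp, hlast]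
  | cons c cs ih =>
    intro p hp hcs
    have hc : 0 ≤ c := hcs c List.mem_cons_self
    simp only [List.map_cons, pvGo]
    rw [pvAt_cons_succ _ _ _ hp, pvAt_cons_succ _ _ _ hc]
    rw [ih (c + 1) (by omega) (fun d hd => hcs d (List.mem_cons_of_mem _ hd))]

theorem pv_go_zero (x : Int) (rest : List Int) (h : rest ≠ [])
    (cs : List Int) (hcs : ∀ c ∈ cs, 0 ≤ c) :
    pvGo (x :: rest) 0 (cs.map (· + 1)) = pvModHead x (pvGo rest 0 cs) := by
  have hl : (1 : Int) ≤ (rest.length : Int) := by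
    have := List.length_pos_of_ne_nil h; exact_mod_cast this
  have hlast : pvAt (x :: rest) (((x :: rest).length : Int) - 1)
      = pvAt rest ((rest.length : Int) - 1) := by
    have e : ((x :: rest).length : Int) - 1 = ((rest.length : Int) - 1) + 1 := by
      push_cast [List.length_cons]; ring
    rw [e, pvAt_cons_succ _ _ _ (by omega)]
  cases cs with
  | nil =>
    simp only [List.map_nil, pvGo]
    rw [pvAt_zero_cons, hlast, pvModHead]
  | cons c cs =>
    have hc : 0 ≤ c := hcs c List.mem_cons_self
    simp only [List.map_cons, pvGo]
    rw [pvAt_zero_cons, pvAt_cons_succ _ _ _ hc]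
    have : pvGo (x :: rest) (c + 1 + 1) (cs.map (· + 1)) = pvGo rest (c + 1) cs :=
      pv_go_shift x rest h cs (c + 1) (by omega)
        (fun d hd => hcs d (List.mem_cons_of_mem _ hd))
    rw [this, pvModHead]

theorem pv_ranges_modHead (t : List Int) :
    ∀ (prev s s' : Int), pvRanges s prev t = pvModHead s (pvRanges s' prev t) := by
  induction t with
  | nil => intro prev s s'; simp [pvRanges, pvModHead]
  | cons a t ih =>
    intro prev s s'
    by_cases h : a = prev + 1
    · have e1 : pvRanges s prev (a :: t) = pvRanges s a t := by simp [pvRanges, h]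
      have e2 : pvRanges s' prev (a :: t) = pvRanges s' a t := by simp [pvRanges, h]
      rw [e1, e2]; exact ih a s s'
    · have e1 : pvRanges s prev (a :: t) = [s, prev] :: pvRanges a a t := by simp [pvRanges, h]
      have e2 : pvRanges s' prev (a :: t) = [s', prev] :: pvRanges a a t := by simp [pvRanges, h]
      rw [e1, e2]; rfl

theorem pv_main (rest : List Int) : ∀ (x : Int),
    pvGo (x :: rest) 0 (pvSplitIndices (x :: rest)) = pvRanges x x rest := by
  induction rest with
  | nil =>
    intro x
    rw [pv_sIdx_singleton]
    simp [pvGo, pvRanges, pvAt_zero_cons]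
  | cons y t ih =>
    intro x
    rw [pv_sIdx_cons]
    by_cases h : y = x + 1
    · rw [if_neg (by simp [h]), List.nil_append]
      rw [pv_go_zero x (y :: t) (by simp) _ (pv_sIdx_nonneg _), ih y]
      have e : pvRanges x x (y :: t) = pvRanges x y t := by simp [pvRanges, h]
      rw [e]; exact (pv_ranges_modHead t y x y).symm
    · rw [if_pos h]
      have e : (([0] : List Int) ++ (pvSplitIndices (y :: t)).map (· + 1))
          = 0 :: (pvSplitIndices (y :: t)).map (· + 1) := rfl
      rw [e]
      simp only [pvGo]
      rw [pvAt_zero_cons, show (0 : Int) + 1 = 0 + 1 from rfl]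
      rw [pv_go_shift x (y :: t) (by simp) _ 0 le_rfl (pv_sIdx_nonneg _), ih y]
      simp [pvRanges, h]

theorem pv_chain (xs : List Int) : ∀ (s prev : Int), s ≤ prev →
    (pvRanges s prev xs).flatMap
        (fun r => PySem.List.pyRange (pvAt r 0) (pvAt r 1 + 1) 1)
      = PySem.List.pyRange s (prev + 1) 1 ++ xs := by
  induction xs with
  | nil =>
    intro s prev hsp
    have h1 : pvAt [s, prev] 1 = prev := by
      have := pvAt_cons_succ s [prev] 0 le_rfl
      rw [pvAt_zero_cons] at this
      simpa using this
    simp [pvRanges, pvAt_zero_cons, h1]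
  | cons a xs ih =>
    intro s prev hsp
    by_cases h : a = prev + 1
    · have e : pvRanges s prev (a :: xs) = pvRanges s a xs := by simp [pvRanges, h]
      rw [e, ih s a (by omega)]
      rw [h, PySem.List.pyRange_one_succ_right (by omega : s ≤ prev + 1)]
      simp
    · have e : pvRanges s prev (a :: xs) = [s, prev] :: pvRanges a a xs := by
        simp [pvRanges, h]
      rw [e, List.flatMap_cons, ih a a le_rfl]
      have h1 : pvAt [s, prev] 1 = prev := by
        have := pvAt_cons_succ s [prev] 0 le_rfl
        rw [pvAt_zero_cons] at this
        simpa using this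
      rw [PySem.List.pyRange_one_singleton]
      simp [pvAt_zero_cons, h1]

-- ===== VERDICT (by name: the statement is the Claim_ definition above) =====
theorem split_into_ranges_spec : Claim_equal_split_into_ranges := by
  intro fl _ hpre
  cases fl with
  | nil => exact absurd rfl hpre
  | cons x rest =>
    show split_into_ranges (x :: rest) = split_into_ranges_alt (x :: rest)
    have hb : split_into_ranges_alt (x :: rest) = pvRanges x x rest := by
      have := pv_foldB rest x x []
      simpa [split_into_ranges_alt] using this
    have hA := pv_foldA (x :: rest) (pvSplitIndices (x :: rest)) 0 []
    simp only [List.nil_append] at hA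
    have hc := pv_chain rest x x le_rfl
    rw [PySem.List.pyRange_one_singleton] at hc
    simp only [split_into_ranges]
    rw [hA, pv_main rest x, hc]
    simp [hb]
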